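-- pv_equiv track=rewrite | github.com/Aasthaengg/IBMdataset | Python_codes/p03378/s650557992.py | toll
-- ===== SOURCE A (Python) =====
-- def toll(n, x, tolls):
-- 	rcount = 0
-- 	lcount = 0
-- 	for i in range(x, n):
-- 		if i in tolls:
-- 			rcount += 1
-- 	for i in range(1, x):
-- 		if i in tolls:
-- 			lcount += 1
-- 	return min(rcount, lcount)
-- ===== SOURCE B (Python) =====
-- def toll(n, x, tolls):
--     rcount = 0
--     lcount = 0
--     for t in set(tolls):
--         if x <= t < n:
--             rcount += 1
--         elif 1 <= t < x:
--             lcount += 1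
--     return min(rcount, lcount)
-- ===== Notes on version B (the rewrite author's own statement) =====
-- stated objective: faster
-- what changed: Instead of scanning the index ranges [x,n) and [1,x) with an O(len(tolls)) membership test inside each iteration, B makes one pass over set(tolls) and buckets each distinct toll value by which side of x it lies on.
import Mathlib
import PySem

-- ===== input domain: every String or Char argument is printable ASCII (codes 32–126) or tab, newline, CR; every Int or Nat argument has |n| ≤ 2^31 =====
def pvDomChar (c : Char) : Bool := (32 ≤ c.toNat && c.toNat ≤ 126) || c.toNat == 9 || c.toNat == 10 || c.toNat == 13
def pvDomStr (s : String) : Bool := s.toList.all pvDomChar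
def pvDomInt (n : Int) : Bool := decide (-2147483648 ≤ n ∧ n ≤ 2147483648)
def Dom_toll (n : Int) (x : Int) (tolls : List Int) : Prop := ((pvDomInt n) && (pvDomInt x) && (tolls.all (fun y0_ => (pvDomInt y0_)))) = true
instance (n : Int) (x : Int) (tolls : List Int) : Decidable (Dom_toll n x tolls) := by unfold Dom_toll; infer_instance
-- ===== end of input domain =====

-- ===== PORT A =====
-- A: scan range(x, n) and range(1, x), testing membership in tolls at each index.
def toll (n : Int) (x : Int) (tolls : List Int) : Int :=
  let rcount : Int :=
    (PySem.List.pyRange x n 1).foldl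
      (fun acc i => if tolls.contains i then acc + 1 else acc) 0
  let lcount : Int :=
    (PySem.List.pyRange 1 x 1).foldl
      (fun acc i => if tolls.contains i then acc + 1 else acc) 0
  min rcount lcount

-- ===== PORT B =====
-- B: one pass over set(tolls), bucketing each distinct value by side of x; faster (no per-index membership scan).
def toll_alt (n : Int) (x : Int) (tolls : List Int) : Int :=
  let s := PySem.Set.ofList tolls
  let rl : Int × Int :=
    s.foldl
      (fun acc t =>
        if x ≤ t && t < n then (acc.1 + 1, acc.2)
        else if 1 ≤ t && t < x then (acc.1, acc.2 + 1)
        else acc) (0, 0)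
  min rl.1 rl.2

-- ===== PRECONDITION & SPEC =====
def Spec_toll (n : Int) (x : Int) (tolls : List Int) (out : Int) : Prop := out = toll_alt n x tolls
instance (n : Int) (x : Int) (tolls : List Int) (out : Int) : Decidable (Spec_toll n x tolls out) := by unfold Spec_toll; infer_instance

-- ===== CLAIM (what is proved, stated in full; the proofs are below) =====
def Claim_equal_toll : Prop := ∀ (n : Int) (x : Int) (tolls : List Int), Dom_toll n x tolls → Spec_toll n x tolls (toll n x tolls)

-- ===== LEMMAS AND PROOFS =====

-- A's counting loop is the length of the filtered list.
theorem foldl_count_eq_filter (p : Int → Bool) (l : List Int) (c : Int) :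
    l.foldl (fun acc i => if p i then acc + 1 else acc) c = c + ((l.filter p).length : Int) := by
  induction l generalizing c with
  | nil => simp
  | cons a t ih =>
    by_cases h : p a <;> simp [List.foldl_cons, List.filter_cons, h, ih] <;> push_cast <;> ring

-- B's pair loop computes the two filtered lengths.
theorem foldl_pair_eq_filter (p q : Int → Bool) (l : List Int) (r s : Int) :
    l.foldl
      (fun (acc : Int × Int) t =>
        if p t then (acc.1 + 1, acc.2)
        else if q t then (acc.1, acc.2 + 1)
        else acc) (r, s)
    = (r + ((l.filter p).length : Int),
       s + ((l.filter (fun t => !p t && q t)).length : Int)) := by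
  induction l generalizing r s with
  | nil => simp
  | cons a t ih =>
    by_cases hp : p a
    · simp [List.foldl_cons, List.filter_cons, hp, ih]; push_cast; ring
    · by_cases hq : q a <;>
        simp [List.foldl_cons, List.filter_cons, hp, hq, ih] <;> push_cast <;> ring

-- Two nodup lists with the same members have the same length.
theorem length_eq_of_nodup_iff {l1 l2 : List Int} (h1 : l1.Nodup) (h2 : l2.Nodup)
    (h : ∀ a, a ∈ l1 ↔ a ∈ l2) : l1.length = l2.length :=
  ((List.perm_ext_iff_of_nodup h1 h2).mpr h).length_eq

theorem right_count_eq (n x : Int) (tolls : List Int) :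
    ((PySem.List.pyRange x n 1).filter (fun i => tolls.contains i)).length
      = (((PySem.Set.ofList tolls : List Int)).filter (fun t => x ≤ t && t < n)).length := by
  apply length_eq_of_nodup_iff
  · exact (PySem.List.nodup_pyRange_one x n).filter _
  · exact (PySem.Set.nodup_ofList tolls).filter _
  · intro a
    simp [List.mem_filter, PySem.List.mem_pyRange_one, PySem.Set.mem_ofList]
    tauto

theorem left_count_eq (n x : Int) (tolls : List Int) :
    ((PySem.List.pyRange 1 x 1).filter (fun i => tolls.contains i)).length
      = (((PySem.Set.ofList tolls : List Int)).filter
          (fun t => !(x ≤ t && t < n) && (1 ≤ t && t < x))).length := by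
  apply length_eq_of_nodup_iff
  · exact (PySem.List.nodup_pyRange_one 1 x).filter _
  · exact (PySem.Set.nodup_ofList tolls).filter _
  · intro a
    simp [List.mem_filter, PySem.List.mem_pyRange_one, PySem.Set.mem_ofList]
    constructor
    · rintro ⟨⟨h1, h2⟩, h3⟩
      exact ⟨h3, Or.inl (by omega), h1, h2⟩
    · rintro ⟨h3, _, h1, h2⟩
      exact ⟨⟨h1, h2⟩, h3⟩

-- ===== VERDICT (by name: the statement is the Claim_ definition above) =====
theorem toll_spec : Claim_equal_toll := by
  intro n x tolls _
  unfold Spec_toll toll toll_alt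
  simp only [foldl_count_eq_filter, foldl_pair_eq_filter,
             right_count_eq n x tolls, left_count_eq n x tolls]
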